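-- pv_equiv track=rewrite | github.com/SpiNNakerManchester/SpiNNGym | examples/graphs/weight-change-graph.py | potentiation_and_depression_list
-- ===== SOURCE A (Python) =====
-- def potentiation_and_depression_list(connections):
--     potentiation_list = []
--     unaffected_list = []
--     depression_list = []
--
--     for connection in connections:
--         if connection[2] < 0:
--             depression_list.append(connection)
--         elif connection[2] == 0:
--             unaffected_list.append(connection)
--         else:
--             potentiation_list.append(connection)
--
--     return potentiation_list, unaffected_list, depression_list
-- ===== SOURCE B (Python) =====
-- def potentiation_and_depression_list(connections):
--     conns = list(connections)
--     return ([c for c in conns if c[2] > 0],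
--             [c for c in conns if c[2] == 0],
--             [c for c in conns if c[2] < 0])
-- ===== Notes on version B (the rewrite author's own statement) =====
-- stated objective: simpler
-- what changed: Replaces the single accumulating loop over three mutable lists with three independent filtering comprehensions (after materialising the input so iterators are scanned once per pass).
import Mathlib
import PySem

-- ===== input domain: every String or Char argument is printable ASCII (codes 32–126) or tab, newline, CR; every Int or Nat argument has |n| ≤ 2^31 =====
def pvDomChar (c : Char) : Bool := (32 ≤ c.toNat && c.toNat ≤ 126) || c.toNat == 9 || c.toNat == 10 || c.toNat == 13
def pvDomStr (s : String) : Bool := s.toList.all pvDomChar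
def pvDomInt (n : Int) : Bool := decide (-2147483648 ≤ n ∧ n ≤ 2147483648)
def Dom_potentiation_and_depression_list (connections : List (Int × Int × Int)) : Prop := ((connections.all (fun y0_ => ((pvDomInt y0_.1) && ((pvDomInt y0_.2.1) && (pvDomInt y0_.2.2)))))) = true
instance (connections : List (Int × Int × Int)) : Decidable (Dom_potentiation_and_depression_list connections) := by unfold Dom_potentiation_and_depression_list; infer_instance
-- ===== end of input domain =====

-- B replaces A's single accumulating loop with three independent filtering passes (objective: simpler).

-- ===== PORT A =====
-- one pass; state = (potentiation_list, unaffected_list, depression_list), appends at the back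
def potentiation_and_depression_list (connections : List (Int × Int × Int)) : (List (Int × Int × Int)) × (List (Int × Int × Int)) × (List (Int × Int × Int)) :=
  let st := connections.foldl
    (fun (st : List (Int × Int × Int) × List (Int × Int × Int) × List (Int × Int × Int)) c =>
      if c.2.2 < 0 then (st.1, st.2.1, st.2.2 ++ [c])
      else if c.2.2 = 0 then (st.1, st.2.1 ++ [c], st.2.2)
      else (st.1 ++ [c], st.2.1, st.2.2))
    ([], [], [])
  st

-- ===== PORT B =====
-- three filtering comprehensions over the materialised list
def potentiation_and_depression_list_alt (connections : List (Int × Int × Int)) : (List (Int × Int × Int)) × (List (Int × Int × Int)) × (List (Int × Int × Int)) :=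
  (connections.filter (fun c => 0 < c.2.2),
   connections.filter (fun c => c.2.2 = 0),
   connections.filter (fun c => c.2.2 < 0))

-- ===== PRECONDITION & SPEC =====
def Spec_potentiation_and_depression_list (connections : List (Int × Int × Int)) (out : (List (Int × Int × Int)) × (List (Int × Int × Int)) × (List (Int × Int × Int))) : Prop := out = potentiation_and_depression_list_alt connections
instance (connections : List (Int × Int × Int)) (out : (List (Int × Int × Int)) × (List (Int × Int × Int)) × (List (Int × Int × Int))) : Decidable (Spec_potentiation_and_depression_list connections out) := by unfold Spec_potentiation_and_depression_list; infer_instance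

-- ===== CLAIM (what is proved, stated in full; the proofs are below) =====
def Claim_equal_potentiation_and_depression_list : Prop := ∀ (connections : List (Int × Int × Int)), Dom_potentiation_and_depression_list connections → Spec_potentiation_and_depression_list connections (potentiation_and_depression_list connections)

-- ===== LEMMAS AND PROOFS =====
theorem pv_fold_inv (l p u d : List (Int × Int × Int)) :
    l.foldl
      (fun (st : List (Int × Int × Int) × List (Int × Int × Int) × List (Int × Int × Int)) c =>
        if c.2.2 < 0 then (st.1, st.2.1, st.2.2 ++ [c])
        else if c.2.2 = 0 then (st.1, st.2.1 ++ [c], st.2.2)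
        else (st.1 ++ [c], st.2.1, st.2.2))
      (p, u, d)
    = (p ++ l.filter (fun c => 0 < c.2.2),
       u ++ l.filter (fun c => c.2.2 = 0),
       d ++ l.filter (fun c => c.2.2 < 0)) := by
  induction l generalizing p u d with
  | nil => simp
  | cons c t ih =>
    simp only [List.foldl_cons, List.filter_cons]
    rcases lt_trichotomy c.2.2 0 with h | h | h
    · have h1 : ¬ (0 < c.2.2) := by omega
      have h2 : c.2.2 ≠ 0 := by omega
      simp [h, h1, h2, ih, List.append_assoc]
    · simp [h, ih, List.append_assoc]
    · have h1 : ¬ (c.2.2 < 0) := by omega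
      have h2 : c.2.2 ≠ 0 := by omega
      simp [h, h1, h2, ih, List.append_assoc]

-- ===== VERDICT (by name: the statement is the Claim_ definition above) =====
theorem potentiation_and_depression_list_spec : Claim_equal_potentiation_and_depression_list := by
  intro connections _
  unfold Spec_potentiation_and_depression_list potentiation_and_depression_list potentiation_and_depression_list_alt
  simpa using pv_fold_inv connections [] [] []
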